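-- pv_equiv track=rewrite | github.com/minhluan96/leetcode-practice | leetcode/src/bigocoding/algorithm_complexity/wrath.py | wrath
-- ===== SOURCE A (Python) =====
-- def wrath(n, nums):
--     totalDeath = 0
--
--     '''
--     Set the maxLength equal to n instead of the value of n - 1 or n - 1 because
--     we use this to count the number of death, the last person won't be killed no matter what
--     Therefore, no reason we set it equal to the last person, it will violate the first condition
--     and count the last personn
--     '''
--     killRange = n
--
--     for i in range(n - 1, -1, -1):
--         '''
--         If the position was in the kill range, the death counter will increase
--         '''
--         if i >= killRange:
--             totalDeath += 1
--         killRange = min(killRange, i - nums[i])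
--
--     return n - totalDeath
-- ===== SOURCE B (Python) =====
-- def wrath(n, nums):
--     # person i dies iff some later person j reaches back to i: j - nums[j] <= i
--     totalDeath = sum(
--         1 for i in range(n)
--         if any(j - nums[j] <= i for j in range(i + 1, n))
--     )
--     return n - totalDeath
-- ===== Notes on version B (the rewrite author's own statement) =====
-- stated objective: simpler
-- what changed: replaces A's backward single-pass running-minimum killRange accumulator with a direct two-level scan that counts person i as dead iff some later person j reaches back to it (j - nums[j] <= i), then returns n minus that count
import Mathlib
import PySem

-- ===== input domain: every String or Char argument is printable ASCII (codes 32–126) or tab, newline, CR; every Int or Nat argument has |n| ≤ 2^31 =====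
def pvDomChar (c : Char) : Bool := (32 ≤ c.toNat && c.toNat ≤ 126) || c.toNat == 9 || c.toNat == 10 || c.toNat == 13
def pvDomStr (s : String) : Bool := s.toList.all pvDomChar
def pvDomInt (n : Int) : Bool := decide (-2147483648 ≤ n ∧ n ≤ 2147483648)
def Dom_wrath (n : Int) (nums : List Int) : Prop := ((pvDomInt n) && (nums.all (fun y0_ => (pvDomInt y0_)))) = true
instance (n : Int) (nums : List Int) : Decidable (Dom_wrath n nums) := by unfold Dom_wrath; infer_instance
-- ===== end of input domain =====

-- B replaces A's backward running-minimum killRange pass by a direct two-level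
-- scan counting person i as dead iff some later j reaches back (j - nums[j] ≤ i);
-- objective: simpler (plainer, spec-like), not faster.

-- ===== PORT A =====
-- the loop body of A: state (totalDeath, killRange); nums[i] is in range under Pre_
def wrathStep (nums : List Int) (st : Int × Int) (i : Int) : Int × Int :=
  (if i ≥ st.2 then st.1 + 1 else st.1,
   min st.2 (i - PySem.List.pyGetD nums i 0))

def wrath (n : Int) (nums : List Int) : Int :=
  let s := (PySem.List.pyRange (n - 1) (-1) (-1)).foldl (wrathStep nums) (0, n)
  n - s.1

-- ===== PORT B =====
-- 'any(j - nums[j] <= i for j in range(i + 1, n))'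
def wrathKilled (nums : List Int) (n i : Int) : Bool :=
  (PySem.List.pyRange (i + 1) n 1).any (fun j => decide (j - PySem.List.pyGetD nums j 0 ≤ i))

def wrath_alt (n : Int) (nums : List Int) : Int :=
  let totalDeath := (PySem.List.pyRange 0 n 1).countP (fun i => wrathKilled nums n i)
  n - totalDeath

-- ===== PRECONDITION & SPEC =====
-- A raises IndexError at nums[i] exactly when n > len(nums); everything else is admitted.
def Pre_wrath (n : Int) (nums : List Int) : Prop := n ≤ (nums.length : Int)
instance (n : Int) (nums : List Int) : Decidable (Pre_wrath n nums) := by unfold Pre_wrath; infer_instance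

def pvWitness_wrath : Int × List Int := (3, [0, 2, 1])

def Spec_wrath (n : Int) (nums : List Int) (out : Int) : Prop := out = wrath_alt n nums
instance (n : Int) (nums : List Int) (out : Int) : Decidable (Spec_wrath n nums out) := by unfold Spec_wrath; infer_instance

-- ===== CLAIM (what is proved, stated in full; the proofs are below) =====
def Claim_equal_wrath : Prop := ∀ (n : Int) (nums : List Int), Dom_wrath n nums → Pre_wrath n nums → Spec_wrath n nums (wrath n nums)

-- ===== LEMMAS AND PROOFS =====

-- A's i-th test 'i >= killRange' folded into B's predicate: after processing
-- index N the kill range is min kr (N - nums[N]), and a position i < N is ≥ that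
-- minimum iff it is ≥ kr or the new interval [N - nums[N], N) covers it.
lemma wrath_loop_count (nums : List Int) (N : Nat) :
    ∀ (td kr : Int),
      ((PySem.List.pyRange ((N : Int) - 1) (-1) (-1)).foldl (wrathStep nums) (td, kr)).1
        = td + ((PySem.List.pyRange 0 (N : Int) 1).countP
            (fun i => decide (kr ≤ i) || wrathKilled nums (N : Int) i) : Int) := by
  induction N with
  | zero =>
      intro td kr
      rw [PySem.List.pyRange_neg_one_eq_nil (by norm_num),
          PySem.List.pyRange_one_eq_nil (by norm_num)]
      simp
  | succ N ih =>
      intro td kr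
      have hcons : PySem.List.pyRange (((N : Nat) + 1 : Int) - 1) (-1) (-1)
          = (N : Int) :: PySem.List.pyRange ((N : Int) - 1) (-1) (-1) := by
        have := PySem.List.pyRange_neg_one_cons (a := (N : Int)) (b := (-1)) (by omega)
        simpa using this
      have hsnoc : PySem.List.pyRange 0 (((N : Nat) + 1 : Int)) 1
          = PySem.List.pyRange 0 (N : Int) 1 ++ [(N : Int)] := by
        have := PySem.List.pyRange_one_succ_right (a := (0 : Int)) (b := (N : Int)) (by omega)
        simpa using this
      push_cast
      rw [hcons, List.foldl_cons, hsnoc, List.countP_append]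
      have hstep : wrathStep nums (td, kr) (N : Int)
          = ((if (N : Int) ≥ kr then td + 1 else td), min kr ((N : Int) - PySem.List.pyGetD nums (N : Int) 0)) := by
        simp [wrathStep]
      rw [hstep, ih]
      -- predicates agree elementwise on pyRange 0 N
      have hcongr : (PySem.List.pyRange 0 (N : Int) 1).countP
            (fun i => decide (min kr ((N : Int) - PySem.List.pyGetD nums (N : Int) 0) ≤ i)
                      || wrathKilled nums (N : Int) i)
          = (PySem.List.pyRange 0 (N : Int) 1).countP
            (fun i => decide (kr ≤ i) || wrathKilled nums (((N : Int)) + 1) i) := by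
        apply List.countP_congr
        intro i hi
        have hmem := (PySem.List.mem_pyRange_one).1 hi
        have hsplit : PySem.List.pyRange (i + 1) ((N : Int) + 1) 1
            = PySem.List.pyRange (i + 1) (N : Int) 1 ++ [(N : Int)] := by
          exact PySem.List.pyRange_one_succ_right (by omega)
        simp only [wrathKilled, hsplit, List.any_append, List.any_cons, List.any_nil]
        have : (decide (min kr ((N : Int) - PySem.List.pyGetD nums (N : Int) 0) ≤ i))
            = (decide (kr ≤ i) || decide ((N : Int) - PySem.List.pyGetD nums (N : Int) 0 ≤ i)) := by
          simp only [min_le_iff, Bool.decide_or]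
        rw [this]
        cases decide (kr ≤ i) <;>
          cases decide ((N : Int) - PySem.List.pyGetD nums (N : Int) 0 ≤ i) <;>
          cases (PySem.List.pyRange (i + 1) (N : Int) 1).any
            (fun j => decide (j - PySem.List.pyGetD nums j 0 ≤ i)) <;> simp
      rw [hcongr]
      -- the new last element N: wrathKilled nums (N+1) N is false (empty range)
      have hlast : (fun i => decide (kr ≤ i) || wrathKilled nums (((N : Int)) + 1) i) (N : Int)
          = decide (kr ≤ (N : Int)) := by
        simp only [wrathKilled]
        rw [PySem.List.pyRange_one_eq_nil (by omega)]
        simp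
      simp only [List.countP_cons, List.countP_nil, hlast]
      by_cases hk : kr ≤ (N : Int)
      · simp [hk, ge_iff_le]; ring
      · simp [hk, ge_iff_le]

theorem wrath_eq_alt (n : Int) (nums : List Int) : wrath n nums = wrath_alt n nums := by
  by_cases hn : n ≤ 0
  · simp [wrath, wrath_alt,
      PySem.List.pyRange_neg_one_eq_nil (by omega : n - 1 ≤ (-1 : Int)),
      PySem.List.pyRange_one_eq_nil (by omega : n ≤ (0 : Int))]
  · obtain ⟨N, rfl⟩ : ∃ N : Nat, n = (N : Int) := ⟨n.toNat, (Int.toNat_of_nonneg (by omega)).symm⟩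
    simp only [wrath, wrath_alt]
    rw [wrath_loop_count nums N 0 (N : Int)]
    have : (PySem.List.pyRange 0 (N : Int) 1).countP
          (fun i => decide ((N : Int) ≤ i) || wrathKilled nums (N : Int) i)
        = (PySem.List.pyRange 0 (N : Int) 1).countP (fun i => wrathKilled nums (N : Int) i) := by
      apply List.countP_congr
      intro i hi
      have hmem := (PySem.List.mem_pyRange_one).1 hi
      have : ¬ ((N : Int) ≤ i) := by omega
      simp [this]
    rw [this]
    ring

-- ===== VERDICT (by name: the statement is the Claim_ definition above) =====
theorem wrath_spec : Claim_equal_wrath := by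
  intro n nums _ _
  exact wrath_eq_alt n nums
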